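-- pv_equiv track=rewrite | github.com/eduz1/AdventOfCode2023 | src/December3/src/main.py | box_finder
-- ===== SOURCE A (Python) =====
-- def box_finder(sign, row):
--     start = sign[1]
--     end = sign[2]
--     above = []
--     same = []
--     below = []
--
--     for x in range(start - 1, end + 1):
--         # Skip any left coordinates if any space is -1
--         if x >= 0:
--             # Get coordinates in the row above
--             # Skip if current row is 0
--             if row > 0:
--                 above.append([x, row - 1])
--
--             # Get coordinates in the row below
--             below.append([x, row + 1])
--
--             # Get adjacent coordinates in the same row
--             if (x == start - 1) or (x == end):
--                 same.append([x, row])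
--
--     return above, same, below
-- ===== SOURCE B (Python) =====
-- def box_finder(sign, row):
--     start, end = sign[1], sign[2]
--     body = range(start, end)  # the number's own cells, excluded from the same row
--     # Stage 1: one flat list of every coordinate of the neighbour box.
--     box = [[x, y]
--            for y in (row - 1, row, row + 1)
--            for x in range(max(start - 1, 0), end + 1)
--            if y != row or x not in body]
--     # Stage 2: partition the box by row.
--     above = [c for c in box if c[1] == row - 1] if row > 0 else []
--     same = [c for c in box if c[1] == row]
--     below = [c for c in box if c[1] == row + 1]
--     return above, same, below
-- ===== Notes on version B (the rewrite author's own statement) =====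
-- stated objective: alternative
-- what changed: Instead of A's single loop over the range with three accumulators and per-cell endpoint branching, B generates the whole neighbour box as one flat coordinate list (same-row cells of the number itself excluded by an interval-membership test against range(start, end)) and then partitions that flat list into above/same/below by row in separate passes.
import Mathlib
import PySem

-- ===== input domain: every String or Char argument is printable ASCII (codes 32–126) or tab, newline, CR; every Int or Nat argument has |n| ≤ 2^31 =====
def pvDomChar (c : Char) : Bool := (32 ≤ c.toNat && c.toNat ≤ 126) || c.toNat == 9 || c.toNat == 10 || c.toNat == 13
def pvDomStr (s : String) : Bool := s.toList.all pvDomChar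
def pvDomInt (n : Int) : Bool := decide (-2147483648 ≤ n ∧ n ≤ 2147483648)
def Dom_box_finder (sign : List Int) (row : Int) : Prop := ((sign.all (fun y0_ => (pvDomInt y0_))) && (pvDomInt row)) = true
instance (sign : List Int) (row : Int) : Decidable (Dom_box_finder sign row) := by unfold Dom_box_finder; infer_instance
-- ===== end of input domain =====

-- B first materialises the whole neighbour box as one flat coordinate list (excluding the
-- number's own cells) and then partitions it by row, instead of A's single filtered loop
-- with three accumulators (objective: alternative decomposition).

-- ===== PORT A =====
def box_finder (sign : List Int) (row : Int) : List (List Int) × List (List Int) × List (List Int) :=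
  match PySem.List.pyGet? sign 1, PySem.List.pyGet? sign 2 with
  | some start, some e =>
    (PySem.List.pyRange (start - 1) (e + 1) 1).foldl
      (fun acc x =>
        if 0 ≤ x then
          ((if row > 0 then acc.1 ++ [[x, row - 1]] else acc.1),
           (if x = start - 1 ∨ x = e then acc.2.1 ++ [[x, row]] else acc.2.1),
           acc.2.2 ++ [[x, row + 1]])
        else acc)
      ([], [], [])
  | _, _ => ([], [], [])  -- unreachable under Pre_ (IndexError in Python)

-- ===== PORT B =====
def box_finder_alt (sign : List Int) (row : Int) : List (List Int) × List (List Int) × List (List Int) :=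
  match PySem.List.pyGet? sign 1 with
  | none => ([], [], [])  -- unreachable under Pre_ (IndexError in Python)
  | some start =>
  match PySem.List.pyGet? sign 2 with
  | none => ([], [], [])  -- unreachable under Pre_ (IndexError in Python)
  | some e =>
    -- 'x not in range(start, e)': exact, membership in range(a, b) is a ≤ x < b
    let box : List (List Int) :=
      [row - 1, row, row + 1].flatMap (fun y =>
        ((PySem.List.pyRange (max (start - 1) 0) (e + 1) 1).filter
          (fun x => decide (y ≠ row) || !(decide (start ≤ x ∧ x < e)))).map (fun x => [x, y]))
    let above := if row > 0 then box.filter (fun c => PySem.List.pyGet? c 1 == some (row - 1)) else []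
    let same := box.filter (fun c => PySem.List.pyGet? c 1 == some row)
    let below := box.filter (fun c => PySem.List.pyGet? c 1 == some (row + 1))
    (above, same, below)

-- ===== PRECONDITION & SPEC =====
-- Pre_: sign[1] and sign[2] exist (Python raises IndexError otherwise).
def Pre_box_finder (sign : List Int) (row : Int) : Prop := 3 ≤ sign.length
instance (sign : List Int) (row : Int) : Decidable (Pre_box_finder sign row) := by unfold Pre_box_finder; infer_instance
def pvWitness_box_finder : List Int × Int := ([2, 3, 5], 1)
def Spec_box_finder (sign : List Int) (row : Int) (out : List (List Int) × List (List Int) × List (List Int)) : Prop := out = box_finder_alt sign row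
instance (sign : List Int) (row : Int) (out : List (List Int) × List (List Int) × List (List Int)) : Decidable (Spec_box_finder sign row out) := by unfold Spec_box_finder; infer_instance

-- ===== CLAIM (what is proved, stated in full; the proofs are below) =====
def Claim_equal_box_finder : Prop := ∀ (sign : List Int) (row : Int), Dom_box_finder sign row → Pre_box_finder sign row → Spec_box_finder sign row (box_finder sign row)

-- ===== LEMMAS AND PROOFS =====

-- A's loop over any list equals three filter-then-map passes.
theorem bf_loop (s e row : Int) (l : List Int) (a sm b : List (List Int)) :
    l.foldl
      (fun (acc : List (List Int) × List (List Int) × List (List Int)) x =>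
        if 0 ≤ x then
          ((if row > 0 then acc.1 ++ [[x, row - 1]] else acc.1),
           (if x = s - 1 ∨ x = e then acc.2.1 ++ [[x, row]] else acc.2.1),
           acc.2.2 ++ [[x, row + 1]])
        else acc)
      (a, sm, b)
    = (a ++ (if row > 0 then (l.filter (fun x => decide (0 ≤ x))).map (fun x => [x, row - 1]) else []),
       sm ++ (l.filter (fun x => decide (0 ≤ x ∧ (x = s - 1 ∨ x = e)))).map (fun x => [x, row]),
       b ++ (l.filter (fun x => decide (0 ≤ x))).map (fun x => [x, row + 1])) := by
  induction l generalizing a sm b with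
  | nil => simp
  | cons y l ih =>
    by_cases hy : 0 ≤ y
    · by_cases hs : y = s - 1 ∨ y = e
      · simp [List.foldl_cons, ih, hy, hs]
        split_ifs <;> simp
      · simp [List.foldl_cons, ih, hy, hs]
        split_ifs <;> simp
    · simp [List.foldl_cons, ih, hy]

theorem filter_nonneg_pyRange (s e : Int) :
    (PySem.List.pyRange (s - 1) (e + 1) 1).filter (fun x => decide (0 ≤ x))
      = PySem.List.pyRange (max (s - 1) 0) (e + 1) 1 := by
  rcases le_or_gt 0 (s - 1) with h | h
  · rw [max_eq_left (by omega)]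
    rw [List.filter_eq_self.mpr]
    intro x hx
    have := (PySem.List.mem_pyRange_one).mp hx
    simpa using (by omega : 0 ≤ x)
  · rw [max_eq_right (by omega)]
    rcases le_or_gt 0 (e + 1) with he | he
    · rw [PySem.List.pyRange_one_append (s - 1) 0 (e + 1) (by omega) he, List.filter_append]
      rw [List.filter_eq_nil_iff.mpr, List.filter_eq_self.mpr]
      · simp
      · intro x hx
        have := (PySem.List.mem_pyRange_one).mp hx
        simpa using (by omega : 0 ≤ x)
      · intro x hx
        have := (PySem.List.mem_pyRange_one).mp hx
        simpa using (by omega : ¬ 0 ≤ x)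
    · rw [List.filter_eq_nil_iff.mpr (by
        intro x hx
        have := (PySem.List.mem_pyRange_one).mp hx
        simpa using (by omega : ¬ 0 ≤ x))]
      rw [PySem.List.pyRange_one_eq_nil (by omega)]

-- partitioning a map-built row by its second coordinate keeps all of it or none of it
theorem filter_row (l : List Int) (y z : Int) :
    (l.map (fun x => [x, y])).filter (fun c => PySem.List.pyGet? c 1 == some z)
      = if y = z then l.map (fun x => [x, y]) else [] := by
  rw [List.filter_map]
  have : ((fun c => PySem.List.pyGet? c 1 == some z) ∘ fun x => [x, y]) = fun _ => decide (y = z) := by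
    funext x
    by_cases h : y = z <;> simp [Function.comp, PySem.List.pyGet?, PySem.List.pyIdx?, h]
  rw [this]
  by_cases h : y = z <;> simp [h]

-- the same-row survivors of B's body-exclusion are exactly A's endpoint survivors
theorem filter_body_eq_endpoints (s e : Int) :
    (PySem.List.pyRange (max (s - 1) 0) (e + 1) 1).filter
        (fun x => decide ((row : Int) ≠ row) || !(decide (s ≤ x ∧ x < e)))
      = (PySem.List.pyRange (max (s - 1) 0) (e + 1) 1).filter (fun x => decide (x = s - 1 ∨ x = e)) := by
  apply List.filter_congr
  intro x hx
  have hm := (PySem.List.mem_pyRange_one).mp hx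
  simp only [ne_eq, not_true_eq_false, decide_false, Bool.false_or]
  have hmax : max (s - 1) 0 ≤ x := hm.1
  simp only [max_le_iff] at hmax
  by_cases h : x = s - 1 ∨ x = e
  · simp [h]; omega
  · simp [h]; push Not at h; omega

-- A's combined same-row test over the raw range equals the endpoint test over the clamped range
theorem same_filter (b c : Int) :
    (PySem.List.pyRange (b - 1) (c + 1) 1).filter (fun x => decide (0 ≤ x ∧ (x = b - 1 ∨ x = c)))
      = (PySem.List.pyRange (max (b - 1) 0) (c + 1) 1).filter (fun x => decide (x = b - 1 ∨ x = c)) := by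
  rw [← filter_nonneg_pyRange b c, List.filter_filter]
  exact List.filter_congr (fun x _ => by
    by_cases h0 : (0:Int) ≤ x <;> by_cases h : (x = b - 1 ∨ x = c) <;> simp [h0, h])

-- ===== VERDICT (by name: the statement is the Claim_ definition above) =====
theorem box_finder_spec : Claim_equal_box_finder := by
  intro sign row _ hpre
  unfold Pre_box_finder at hpre
  match sign, hpre with
  | a :: b :: c :: t, _ =>
    unfold Spec_box_finder box_finder box_finder_alt
    have h1 : PySem.List.pyGet? (a :: b :: c :: t) 1 = some b := by
      simp [PySem.List.pyGet?, PySem.List.pyIdx?, show (0:Int) ≤ (t.length:Int) + 1 by omega]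
    have h2 : PySem.List.pyGet? (a :: b :: c :: t) 2 = some c := by
      simp [PySem.List.pyGet?, PySem.List.pyIdx?, show (2:Int) ≤ (t.length:Int) + 1 + 1 by omega]
    rw [h1, h2]
    simp only
    rw [bf_loop b c row]
    -- B's box: evaluate the three rows
    have hbox :
        ([row - 1, row, row + 1].flatMap (fun y =>
          ((PySem.List.pyRange (max (b - 1) 0) (c + 1) 1).filter
            (fun x => decide (y ≠ row) || !(decide (b ≤ x ∧ x < c)))).map (fun x => [x, y])))
        = (PySem.List.pyRange (max (b - 1) 0) (c + 1) 1).map (fun x => [x, row - 1])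
          ++ ((PySem.List.pyRange (max (b - 1) 0) (c + 1) 1).filter (fun x => decide (x = b - 1 ∨ x = c))).map (fun x => [x, row])
          ++ (PySem.List.pyRange (max (b - 1) 0) (c + 1) 1).map (fun x => [x, row + 1]) := by
      rw [List.flatMap_cons, List.flatMap_cons, List.flatMap_cons, List.flatMap_nil]
      rw [filter_body_eq_endpoints b c]
      have hne1 : (fun x : Int => decide (row - 1 ≠ row) || !(decide (b ≤ x ∧ x < c))) = fun _ => true := by
        funext x; simp [show row - 1 ≠ row by omega]
      have hne2 : (fun x : Int => decide (row + 1 ≠ row) || !(decide (b ≤ x ∧ x < c))) = fun _ => true := by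
        funext x; simp [show row + 1 ≠ row by omega]
      rw [hne1, hne2]
      simp [List.filter_true]
    rw [hbox]
    -- partition the box
    simp only [List.filter_append, filter_row]
    rw [same_filter b c]
    simp only [filter_nonneg_pyRange]
    simp [show ¬(row = row - 1) by omega, show ¬(row + 1 = row - 1) by omega,
          show ¬(row - 1 = row) by omega, show ¬(row + 1 = row) by omega,
          show ¬(row - 1 = row + 1) by omega, show ¬(row = row + 1) by omega]
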